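-- pv_equiv track=rewrite | github.com/akshay-saraswat/ai-trading | backend/market_data.py | _is_valid_ticker
-- ===== SOURCE A (Python) =====
-- def _is_valid_ticker(ticker: str) -> bool:
--     """
--     Validate ticker symbol to filter out problematic tickers.
--     Returns True if ticker is likely valid.
--     """
--     if not ticker or len(ticker) > 6:
--         return False
--
--     # Skip common problematic patterns (but allow - for some valid tickers)
--     invalid_patterns = ['^', '=', '/', ' ']
--     if any(pattern in ticker for pattern in invalid_patterns):
--         return False
--
--     # Must be mostly alphanumeric (allow one dash or dot)
--     cleaned = ticker.replace('-', '').replace('.', '')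
--     if not cleaned.isalnum():
--         return False
--
--     return True
-- ===== SOURCE B (Python) =====
-- def _is_valid_ticker(ticker: str) -> bool:
--     """
--     Validate ticker symbol to filter out problematic tickers.
--     Returns True if ticker is likely valid.
--     """
--     if not ticker or len(ticker) > 6:
--         return False
--     saw_alnum = False
--     for c in ticker:
--         if c == '-' or c == '.':
--             continue
--         if not c.isalnum():
--             return False
--         saw_alnum = True
--     return saw_alnum
-- ===== Notes on version B (the rewrite author's own statement) =====
-- stated objective: simpler
-- what changed: Replaces the separate substring-pattern scan and the double replace-then-isalnum whole-string passes with a single character loop tracking one saw_alnum flag; the invalid-patterns check disappears because those characters are non-alphanumeric anyway.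
import Mathlib
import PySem

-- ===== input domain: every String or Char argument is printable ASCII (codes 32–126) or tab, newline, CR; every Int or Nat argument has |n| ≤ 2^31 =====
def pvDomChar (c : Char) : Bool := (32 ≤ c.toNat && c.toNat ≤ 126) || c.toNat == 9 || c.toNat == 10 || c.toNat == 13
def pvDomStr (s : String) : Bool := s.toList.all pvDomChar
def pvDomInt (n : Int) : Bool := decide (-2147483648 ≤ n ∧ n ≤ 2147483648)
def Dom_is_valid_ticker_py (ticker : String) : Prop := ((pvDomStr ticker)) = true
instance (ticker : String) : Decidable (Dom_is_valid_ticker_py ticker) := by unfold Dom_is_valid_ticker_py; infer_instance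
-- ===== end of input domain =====

-- ===== PORT A =====
-- B replaces A's separate pattern scan and replace/replace/isalnum passes by one character loop (objective: simpler).
def is_valid_ticker_py (ticker : String) : Bool :=
  if PySem.Str.len ticker == 0 || decide (PySem.Str.len ticker > 6) then false
  else if ["^", "=", "/", " "].any (fun p => PySem.Str.isIn p ticker) then false
  else if !PySem.Str.strIsalnum (PySem.Str.replace (PySem.Str.replace ticker "-" "") "." "") then false
  else true

-- ===== PORT B =====
-- the for-loop over the characters with the saw_alnum flag and early return False
def altLoop : List Char → Bool → Bool
  | [], saw => saw
  | c :: rest, saw =>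
    if c = '-' ∨ c = '.' then altLoop rest saw
    else if !PySem.Chars.isalnum c then false
    else altLoop rest true

def is_valid_ticker_py_alt (ticker : String) : Bool :=
  if PySem.Str.len ticker == 0 || decide (PySem.Str.len ticker > 6) then false
  else altLoop ticker.toList false

-- ===== PRECONDITION & SPEC =====
def Spec_is_valid_ticker_py (ticker : String) (out : Bool) : Prop := out = is_valid_ticker_py_alt ticker
instance (ticker : String) (out : Bool) : Decidable (Spec_is_valid_ticker_py ticker out) := by unfold Spec_is_valid_ticker_py; infer_instance

-- ===== CLAIM (what is proved, stated in full; the proofs are below) =====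
def Claim_equal_is_valid_ticker_py : Prop := ∀ (ticker : String), Dom_is_valid_ticker_py ticker → Spec_is_valid_ticker_py ticker (is_valid_ticker_py ticker)

-- ===== LEMMAS AND PROOFS =====

-- s.replace(d, '') for a single character d removes every occurrence of d
lemma replace_go_single (d : Char) :
    ∀ (l : List Char) (fuel : Nat) (acc : List Char), l.length ≤ fuel →
      PySem.Chars.replace.go [d] [] fuel l acc
        = acc.reverse ++ l.filter (fun c => !(c == d))
  | [], fuel, acc, _ => by cases fuel <;> simp [PySem.Chars.replace.go]
  | c :: t, fuel+1, acc, h => by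
    rw [PySem.Chars.replace.go]
    by_cases hc : c = d
    · subst hc
      simp [List.isPrefixOf, replace_go_single c t fuel acc (by simpa using h)]
    · simp [List.isPrefixOf, hc, replace_go_single d t fuel (c :: acc) (by simpa using h),
        Ne.symm hc]

lemma replace_single (d : Char) (l : List Char) :
    PySem.Chars.replace l [d] [] = l.filter (fun c => !(c == d)) := by
  simp [PySem.Chars.replace, replace_go_single d l l.length [] le_rfl]

-- the characters B's loop keeps: neither '-' nor '.'
def pSep (c : Char) : Bool := !(c == '-') && !(c == '.')

-- loop invariant: B's loop checks isalnum on the kept characters and remembers whether it kept any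
lemma altLoop_eq (cs : List Char) : ∀ saw,
    altLoop cs saw = ((cs.filter pSep).all PySem.Chars.isalnum && (saw || !(cs.filter pSep).isEmpty)) := by
  induction cs with
  | nil => simp [altLoop]
  | cons c t ih =>
    intro saw
    by_cases hs : c = '-' ∨ c = '.'
    · have : pSep c = false := by rcases hs with h | h <;> simp [pSep, h]
      simp [altLoop, hs, ih, this]
    · have hp : pSep c = true := by
        simp only [pSep, Bool.and_eq_true, Bool.not_eq_true', beq_eq_false_iff_ne]
        push Not at hs
        exact ⟨hs.1, hs.2⟩
      by_cases ha : PySem.Chars.isalnum c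
      · simp [altLoop, hs, ha, ih, hp]
      · simp [altLoop, hs, ha, hp]

-- a pattern character present in the string makes the cleaned string non-alphanumeric
lemma pattern_kills (cs : List Char) (p : Char) (hmem : p ∈ cs)
    (hsep : pSep p = true) (hna : PySem.Chars.isalnum p = false) :
    (cs.filter pSep).all PySem.Chars.isalnum = false := by
  have : p ∈ cs.filter pSep := List.mem_filter.mpr ⟨hmem, hsep⟩
  exact List.all_eq_false.mpr ⟨p, this, by simp [hna]⟩

lemma main_eq (ticker : String) : is_valid_ticker_py ticker = is_valid_ticker_py_alt ticker := by
  unfold is_valid_ticker_py is_valid_ticker_py_alt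
  by_cases hl : (PySem.Str.len ticker == 0 || decide (PySem.Str.len ticker > 6)) = true
  · rw [if_pos hl, if_pos hl]
  · rw [if_neg hl, if_neg hl, altLoop_eq]
    have hclean : (PySem.Str.replace (PySem.Str.replace ticker "-" "") "." "").toList
        = ticker.toList.filter pSep := by
      simp only [PySem.Str.toList_replace]
      have h1 : ("-" : String).toList = ['-'] := rfl
      have h2 : ("." : String).toList = ['.'] := rfl
      have h3 : ("" : String).toList = [] := rfl
      rw [h1, h2, h3, replace_single, replace_single, List.filter_filter]
      unfold pSep
      apply List.filter_congr
      intro a _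
      rw [Bool.and_comm]
    by_cases hp : (["^", "=", "/", " "].any (fun p => PySem.Str.isIn p ticker)) = true
    · rw [if_pos hp]
      simp only [List.any_eq_true, List.mem_cons, List.not_mem_nil, or_false] at hp
      obtain ⟨q, hq, hin⟩ := hp
      have hinfix := (PySem.Str.isIn_iff_infix q ticker).mp hin
      rcases hq with rfl | rfl | rfl | rfl <;>
        · have hmem : _ ∈ ticker.toList := (List.singleton_infix_iff _ _).mp hinfix
          rw [pattern_kills ticker.toList _ hmem (by decide) (by decide)]
          simp
    · rw [if_neg hp]
      have : PySem.Str.strIsalnum (PySem.Str.replace (PySem.Str.replace ticker "-" "") "." "")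
          = ((ticker.toList.filter pSep).all PySem.Chars.isalnum
              && !(ticker.toList.filter pSep).isEmpty) := by
        rw [PySem.Str.strIsalnum_eq, hclean, PySem.Chars.strIsalnum, Bool.and_comm]
      rw [this]
      cases h1 : (ticker.toList.filter pSep).all PySem.Chars.isalnum <;>
        cases h2 : (ticker.toList.filter pSep).isEmpty <;> simp

-- ===== VERDICT (by name: the statement is the Claim_ definition above) =====
theorem is_valid_ticker_py_spec : Claim_equal_is_valid_ticker_py := by
  intro ticker _
  unfold Spec_is_valid_ticker_py
  exact main_eq ticker
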